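-- pv_equiv track=rewrite | github.com/LIMDANBI/study_coding | pro_신규 아이디 추천.py | solution
-- ===== SOURCE A (Python) =====
-- def solution(new_id):
--     answer = ''
--
--     # step 1. 대문자를 대응되는 소문자로 치환
--     new_id = new_id.lower()
--
--     # step 2. 알파벳 소문자, 숫자, 빼기(-), 밑줄(_), 마침표(.)를 제외한 모든 문자를 제거
--     for c in new_id:
--         if c.islower() or c.isdigit() or c in ['-', '_', '.']:
--             answer+=c
--
--     # step 3. 마침표(.)가 2번 이상 연속된 부분을 하나의 마침표(.)로 치환
--     while '..' in answer:
--         answer = answer.replace('..', '.')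
--
--     # step 4. 마침표(.)가 처음이나 끝에 위치한다면 제거
--     if len(answer) and answer[0] == '.':
--         answer = answer[1:]
--     if len(answer) and answer[-1] == '.':
--         answer = answer[:-1]
--
--     # step 5. 빈 문자열이라면, "a"를 대입
--     if answer == '':
--         answer = 'a'
--
--     # step 6. 길이가 16자 이상이면, 첫 15개의 문자를 제외한 나머지 문자들을 모두 제거 (끝 마침표 제거)
--     if len(answer) > 15:
--         answer = answer[:15]
--         if answer[-1] == '.':
--             answer = answer[:-1]
--
--     # step 7. 길이가 2자 이하라면, 마지막 문자를 길이가 3이 될 때까지 반복해서 끝에 붙임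
--     while len(answer) <= 2:
--         answer += answer[-1]
--
--     return answer
-- ===== SOURCE B (Python) =====
-- def solution(new_id):
--     # single pass: lowercase + filter + collapse dot runs (never start with a dot)
--     out = []
--     for ch in new_id:
--         c = ch.lower()
--         if c.isdigit() or 'a' <= c <= 'z' or c == '-' or c == '_':
--             out.append(c)
--         elif c == '.' and out and out[-1] != '.':
--             out.append(c)
--     if out and out[-1] == '.':
--         out.pop()
--     s = ''.join(out) if out else 'a'
--     if len(s) > 15:
--         s = s[:15]
--         if s[-1] == '.':
--             s = s[:-1]
--     if len(s) < 3:
--         s += s[-1] * (3 - len(s))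
--     return s
-- ===== Notes on version B (the rewrite author's own statement) =====
-- stated objective: alternative
-- what changed: Replaces A's filter-by-string-concatenation plus repeated whole-string replace('..','.') scans and separate strip/slice passes with a single pass that lowercases, filters, collapses dot runs and skips leading dots while building a list, finishing with O(1) fix-ups; it trades A's C-accelerated str operations for one explicit Python loop.
import Mathlib
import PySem

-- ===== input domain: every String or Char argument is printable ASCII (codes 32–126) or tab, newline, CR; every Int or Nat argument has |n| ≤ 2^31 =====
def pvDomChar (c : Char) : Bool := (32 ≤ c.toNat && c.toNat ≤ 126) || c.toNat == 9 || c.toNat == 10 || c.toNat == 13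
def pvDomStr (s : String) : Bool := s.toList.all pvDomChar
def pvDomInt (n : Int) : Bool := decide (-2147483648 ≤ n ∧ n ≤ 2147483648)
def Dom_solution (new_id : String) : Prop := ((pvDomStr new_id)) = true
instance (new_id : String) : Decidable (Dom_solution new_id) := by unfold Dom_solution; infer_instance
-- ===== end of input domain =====

-- B replaces A's repeated replace('..','.') scans, concatenation and strip/slice passes by a
-- single pass that filters, collapses dot runs and never emits a leading dot (objective: alternative).


-- ===== PORT A =====
-- support for aStep3's termination, cited by name in its decreasing_by: one replace('..','.')
-- pass written structurally (pvRep), shown equal to PySem.Chars.replace and strictly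
-- shortening while '..' still occurs
def pvRep : List Char → List Char
  | [] => []
  | c :: t => if c = '.' ∧ t.head? = some '.' then c :: pvRep t.tail else c :: pvRep t
termination_by s => s.length
decreasing_by all_goals simp only [List.length_cons]; cases t <;> simp <;> omega

theorem pvGo_eq (fuel : Nat) : ∀ (l acc : List Char), l.length ≤ fuel →
    PySem.Chars.replace.go ['.', '.'] ['.'] fuel l acc = acc.reverse ++ pvRep l := by
  induction fuel with
  | zero =>
    intro l acc h
    have : l = [] := by cases l <;> simp_all
    subst this
    rw [PySem.Chars.replace.go.eq_def]
    simp [pvRep]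
  | succ n ih =>
    intro l acc h
    rw [PySem.Chars.replace.go.eq_def]
    cases l with
    | nil => simp [pvRep]
    | cons c t =>
      simp only []
      by_cases hp : List.isPrefixOf ['.', '.'] (c :: t) = true
      · rw [if_pos hp]
        have hc : c = '.' ∧ t.head? = some '.' := by
          cases t with
          | nil => simp [List.isPrefixOf] at hp
          | cons d u => simp [List.isPrefixOf] at hp; simp [hp.1.symm, hp.2.symm]
        have hdrop : List.drop (List.length ['.', '.']) (c :: t) = t.tail := by
          cases t <;> simp
        rw [hdrop, ih _ _ (by cases t <;> simp_all <;> omega)]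
        rw [pvRep, if_pos hc]
        simp [hc.1]
      · rw [if_neg hp]
        have hc : ¬ (c = '.' ∧ t.head? = some '.') := by
          intro ⟨h1, h2⟩
          cases t with
          | nil => simp at h2
          | cons d u => simp_all [List.isPrefixOf]
        rw [ih _ _ (by simp at h; omega)]
        rw [pvRep, if_neg hc]
        simp

theorem pvReplace_eq (s : List Char) :
    PySem.Chars.replace s ['.', '.'] ['.'] = pvRep s := by
  rw [PySem.Chars.replace]
  simp [pvGo_eq s.length s [] le_rfl]

theorem pvRep_len_le (s : List Char) : (pvRep s).length ≤ s.length := by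
  induction s using pvRep.induct with
  | case1 => simp [pvRep]
  | case2 c t h ih => rw [pvRep, if_pos h]; cases t <;> simp_all <;> omega
  | case3 c t h ih => rw [pvRep, if_neg h]; simpa using ih

theorem pvRep_len_lt (s : List Char) (h : ['.', '.'] <:+: s) : (pvRep s).length < s.length := by
  induction s using pvRep.induct with
  | case1 => simp at h
  | case2 c t hc ih =>
    rw [pvRep, if_pos hc]
    have := pvRep_len_le t.tail
    cases t <;> simp_all <;> omega
  | case3 c t hc ih =>
    rw [pvRep, if_neg hc]
    rcases (List.infix_cons_iff).mp h with hpre | hinf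
    · exfalso
      apply hc
      cases t with
      | nil => rcases hpre with ⟨r, hr⟩; simp at hr
      | cons d u =>
        rcases hpre with ⟨r, hr⟩
        simp at hr
        exact ⟨hr.1.symm, by simp [hr.2.1.symm]⟩
    · have := ih hinf; simp; omega

theorem pvReplaceLen_lt (s : List Char) (h : PySem.Chars.isIn ['.', '.'] s = true) :
    (PySem.Chars.replace s ['.', '.'] ['.']).length < s.length := by
  rw [pvReplace_eq]
  exact pvRep_len_lt s ((PySem.Chars.isIn_iff_infix _ _).mp h)

-- step 3's while loop: replace '..' by '.' while '..' occurs (each replace shortens)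
def aStep3 (s : List Char) : List Char :=
  if h : PySem.Chars.isIn ['.', '.'] s = true then
    aStep3 (PySem.Chars.replace s ['.', '.'] ['.'])
  else s
termination_by s.length
decreasing_by exact pvReplaceLen_lt s h

-- step 7's while loop: append the last char while length ≤ 2
-- (Python raises IndexError on the empty string there, which is unreachable; the guard returns s)
def aStep7 (s : List Char) : List Char :=
  if s.length ≤ 2 then
    match h : PySem.List.pyGet? s (-1) with
    | some c => aStep7 (s ++ [c])
    | none => s
  else s
termination_by 3 - s.length
decreasing_by
  simp only [List.length_append, List.length_singleton]
  have : s ≠ [] := by intro he; subst he; simp [PySem.List.pyGet?] at h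
  have : 0 < s.length := List.length_pos_iff.mpr this
  omega

def solution (new_id : String) : String :=
  -- step 1
  let cs := PySem.Chars.lower new_id.toList
  -- step 2
  let answer := cs.foldl (fun acc c =>
    if PySem.Chars.islower c || PySem.Chars.isdigit c || (c == '-' || c == '_' || c == '.')
    then acc ++ [c] else acc) []
  -- step 3
  let answer := aStep3 answer
  -- step 4
  let answer := if answer.length ≠ 0 ∧ PySem.List.pyGet? answer 0 = some '.'
                then PySem.List.slice answer (some 1) none else answer
  let answer := if answer.length ≠ 0 ∧ PySem.List.pyGet? answer (-1) = some '.'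
                then PySem.List.slice answer none (some (-1)) else answer
  -- step 5
  let answer := if answer = [] then ['a'] else answer
  -- step 6
  let answer := if answer.length > 15 then
                  let a := PySem.List.slice answer none (some 15)
                  if PySem.List.pyGet? a (-1) = some '.' then PySem.List.slice a none (some (-1)) else a
                else answer
  -- step 7
  String.mk (aStep7 answer)

-- ===== PORT B =====
def solution_alt (new_id : String) : String :=
  let out := new_id.toList.foldl (fun acc ch =>
    let c := PySem.Chars.lowerChar ch
    if PySem.Chars.isdigit c = true ∨ ('a' ≤ c ∧ c ≤ 'z') ∨ c = '-' ∨ c = '_' then acc ++ [c]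
    else if c = '.' ∧ acc ≠ [] ∧ acc.getLast? ≠ some '.' then acc ++ [c]
    else acc) []
  let out := if out ≠ [] ∧ out.getLast? = some '.' then out.dropLast else out
  let s := if out = [] then ['a'] else out
  let s := if s.length > 15 then
             let t := s.take 15
             if t.getLast? = some '.' then t.dropLast else t
           else s
  let s := if s.length < 3 then
             match s.getLast? with
             | some c => s ++ List.replicate (3 - s.length) c
             | none => s
           else s
  String.mk s

-- ===== PRECONDITION & SPEC =====
def Spec_solution (new_id : String) (out : String) : Prop := out = solution_alt new_id
instance (new_id : String) (out : String) : Decidable (Spec_solution new_id out) := by unfold Spec_solution; infer_instance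

-- ===== CLAIM (what is proved, stated in full; the proofs are below) =====
def Claim_equal_solution : Prop := ∀ (new_id : String), Dom_solution new_id → Spec_solution new_id (solution new_id)

-- ===== LEMMAS AND PROOFS =====
-- full dot-run collapse: the common normal form of A's replace loop and B's single pass
def pvDedup : List Char → List Char
  | [] => []
  | c :: t => if c = '.' ∧ t.head? = some '.' then pvDedup t else c :: pvDedup t

theorem pvRep_head? (s : List Char) : (pvRep s).head? = s.head? := by
  cases s with
  | nil => simp [pvRep]
  | cons c t => rw [pvRep]; split <;> simp

theorem pvDedup_of_noDD (s : List Char) (h : ¬ ['.', '.'] <:+: s) : pvDedup s = s := by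
  induction s with
  | nil => simp [pvDedup]
  | cons c t ih =>
    rw [pvDedup]
    have hc : ¬ (c = '.' ∧ t.head? = some '.') := by
      intro ⟨h1, h2⟩
      apply h
      cases t with
      | nil => simp at h2
      | cons d u =>
        simp at h2
        exact List.infix_cons_iff.mpr (Or.inl ⟨u, by simp [h1, h2]⟩)
    rw [if_neg hc, ih (fun hi => h (List.infix_cons_iff.mpr (Or.inr hi)))]

theorem pvDedup_rep (s : List Char) : pvDedup (pvRep s) = pvDedup s := by
  induction s using pvRep.induct with
  | case1 => simp [pvRep]
  | case2 c t hc ih =>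
    obtain ⟨h1, h2⟩ := hc
    cases t with
    | nil => simp at h2
    | cons d u =>
      simp at h2
      subst h1; subst h2
      have e1 : pvRep ('.' :: '.' :: u) = '.' :: pvRep u := by
        rw [pvRep, if_pos ⟨rfl, by simp⟩]; rfl
      have e2 : pvDedup ('.' :: '.' :: u) = pvDedup ('.' :: u) := by
        rw [pvDedup, if_pos ⟨rfl, by simp⟩]
      rw [e1, e2]
      simp only [List.tail_cons] at ih
      rw [pvDedup, pvDedup, pvRep_head? u]
      split
      · exact ih
      · rw [ih]
  | case3 c t hc ih =>
    rw [pvRep, if_neg hc]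
    rw [pvDedup, pvDedup, pvRep_head? t]
    rw [if_neg hc, if_neg hc, ih]

theorem pvStep3_eq_dedup (s : List Char) : aStep3 s = pvDedup s := by
  induction hl : s.length using Nat.strong_induction_on generalizing s with
  | _ n ih =>
    subst hl
    rw [aStep3]
    by_cases h : PySem.Chars.isIn ['.', '.'] s = true
    · rw [dif_pos h, pvReplace_eq]
      rw [ih (pvRep s).length (pvRep_len_lt s ((PySem.Chars.isIn_iff_infix _ _).mp h)) _ rfl]
      exact pvDedup_rep s
    · rw [dif_neg h]
      exact (pvDedup_of_noDD s (fun hi => h ((PySem.Chars.isIn_iff_infix _ _).mpr hi))).symm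

theorem pvDedup_eq_nil (s : List Char) : pvDedup s = [] ↔ s = [] := by
  induction s with
  | nil => simp [pvDedup]
  | cons c t ih =>
    rw [pvDedup]
    split
    · rename_i hc
      simp only [ih]
      constructor
      · intro h; subst h; simp at hc
      · intro h; simp at h
    · simp

theorem pvDedup_getLast? (s : List Char) : (pvDedup s).getLast? = s.getLast? := by
  induction s with
  | nil => simp [pvDedup]
  | cons c t ih =>
    rw [pvDedup]
    split
    · rename_i hc
      rw [ih]
      cases t with
      | nil => simp at hc
      | cons d u => simp
    · cases t with
      | nil => simp [pvDedup]
      | cons d u =>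
        have hne : pvDedup (d :: u) ≠ [] := by simp [pvDedup_eq_nil]
        obtain ⟨y, ys, hX⟩ := List.exists_cons_of_ne_nil hne
        rw [hX, List.getLast?_cons_cons, ← hX, ih, List.getLast?_cons_cons]

theorem pvDedup_snoc (xs : List Char) (c : Char) :
    pvDedup (xs ++ [c]) =
      if c = '.' ∧ xs.getLast? = some '.' then pvDedup xs else pvDedup xs ++ [c] := by
  induction xs with
  | nil => simp [pvDedup]
  | cons a ys ih =>
    cases ys with
    | nil =>
      by_cases h1 : c = '.' <;> by_cases h2 : a = '.' <;>
        simp_all [pvDedup]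
    | cons b zs =>
      simp only [List.cons_append] at *
      have hu : pvDedup (a :: b :: zs) =
          if a = '.' ∧ (b :: zs).head? = some '.' then pvDedup (b :: zs)
          else a :: pvDedup (b :: zs) := by rw [pvDedup]
      rw [pvDedup, ih, hu, List.getLast?_cons_cons]
      simp only [List.head?_cons]
      split_ifs <;> simp_all

-- strip one leading dot
def pvSL (s : List Char) : List Char := if s.head? = some '.' then s.tail else s

theorem pvSL_append (x : List Char) (c : Char) (h : x ≠ []) :
    pvSL (x ++ [c]) = pvSL x ++ [c] := by
  obtain ⟨a, t, rfl⟩ := List.exists_cons_of_ne_nil h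
  simp only [pvSL, List.cons_append, List.head?_cons, List.tail_cons]
  split <;> simp

theorem pvSL_nil_iff (x : List Char) : pvSL x = [] ↔ x = [] ∨ x = ['.'] := by
  cases x with
  | nil => simp [pvSL]
  | cons a t =>
    simp only [pvSL, List.head?_cons]
    split <;> rename_i h
    · simp at h
      subst h
      cases t <;> simp
    · simp
      intro h1 h2
      exact h (by simp [h1])

theorem pvSL_getLast? (x : List Char) (h : pvSL x ≠ []) :
    (pvSL x).getLast? = x.getLast? := by
  cases x with
  | nil => simp [pvSL]
  | cons a t =>
    simp only [pvSL, List.head?_cons] at *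
    split <;> rename_i hc
    · rw [if_pos hc] at h
      simp only [List.tail_cons] at *
      obtain ⟨y, ys, rfl⟩ := List.exists_cons_of_ne_nil h
      rw [List.getLast?_cons_cons]
    · simp

-- A's step-2 keep condition
def pvP (c : Char) : Bool :=
  PySem.Chars.islower c || PySem.Chars.isdigit c || (c == '-' || c == '_' || c == '.')

-- B's loop computes: strip-leading-dot of the dot-collapse of A's filtered string
theorem pvBloop (cs : List Char) :
    cs.foldl (fun acc ch =>
      let c := PySem.Chars.lowerChar ch
      if PySem.Chars.isdigit c = true ∨ ('a' ≤ c ∧ c ≤ 'z') ∨ c = '-' ∨ c = '_' then acc ++ [c]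
      else if c = '.' ∧ acc ≠ [] ∧ acc.getLast? ≠ some '.' then acc ++ [c]
      else acc) [] =
    pvSL (pvDedup ((PySem.Chars.lower cs).filter pvP)) := by
  induction cs using List.reverseRecOn with
  | nil => simp [pvSL, pvDedup, PySem.Chars.lower]
  | append_singleton cs ch ih =>
    rw [List.foldl_append, List.foldl_cons, List.foldl_nil, ih]
    have hlow : PySem.Chars.lower (cs ++ [ch]) =
        PySem.Chars.lower cs ++ [PySem.Chars.lowerChar ch] := by
      simp [PySem.Chars.lower]
    rw [hlow, List.filter_append]
    set c := PySem.Chars.lowerChar ch with hc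
    set F := (PySem.Chars.lower cs).filter pvP with hF
    by_cases hk : PySem.Chars.isdigit c = true ∨ ('a' ≤ c ∧ c ≤ 'z') ∨ c = '-' ∨ c = '_'
    · -- kept non-dot character
      rw [if_pos hk]
      have hk' : ('0' ≤ c ∧ c ≤ '9') ∨ ('a' ≤ c ∧ c ≤ 'z') ∨ c = '-' ∨ c = '_' := by
        simpa [PySem.Chars.isdigit] using hk
      have hcd : c ≠ '.' := by
        rcases hk' with h | h | h | h <;> intro he <;> rw [he] at h <;> revert h <;> decide
      have hp : pvP c = true := by
        simp only [pvP, PySem.Chars.islower, PySem.Chars.isdigit, Bool.or_eq_true,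
          Bool.and_eq_true, decide_eq_true_eq, beq_iff_eq]
        tauto
      simp only [List.filter_singleton, hp, cond_true]
      rw [pvDedup_snoc, if_neg (by tauto)]
      by_cases hFnil : pvDedup F = []
      · rw [hFnil]
        simp [pvSL, hcd, (pvDedup_eq_nil F).mp hFnil]
      · rw [pvSL_append _ _ hFnil]
    · rw [if_neg hk]
      by_cases hdot : c = '.'
      · -- a dot
        have hp : pvP c = true := by simp [pvP, hdot]
        simp only [List.filter_singleton, hp, cond_true]
        rw [pvDedup_snoc]
        by_cases hout : pvSL (pvDedup F) = []
        · -- nothing emitted yet: the dot is dropped either way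
          rw [hout, if_neg (by simp)]
          rcases (pvSL_nil_iff _).mp hout with h0 | h1
          · have : F = [] := (pvDedup_eq_nil F).mp h0
            rw [this]
            simp only [List.getLast?_nil]
            rw [if_neg (by simp)]
            simp [pvSL, pvDedup, hdot]
          · have : F.getLast? = some '.' := by
              rw [← pvDedup_getLast?, h1]; simp
            rw [if_pos ⟨hdot, this⟩, hout]
        · have hDne : pvDedup F ≠ [] := fun h => hout (by simp [pvSL, h])
          have hlast : (pvSL (pvDedup F)).getLast? = F.getLast? := by
            rw [pvSL_getLast? _ hout, pvDedup_getLast?]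
          by_cases htr : (pvSL (pvDedup F)).getLast? = some '.'
          · -- trailing dot already: skip
            rw [if_neg (by tauto)]
            rw [if_pos ⟨hdot, by rw [← hlast]; exact htr⟩]
          · rw [if_pos ⟨hdot, hout, htr⟩]
            rw [if_neg (by rw [← hlast]; tauto)]
            rw [pvSL_append _ _ hDne]
      · -- removed character
        have hk' : ¬ (('0' ≤ c ∧ c ≤ '9') ∨ ('a' ≤ c ∧ c ≤ 'z') ∨ c = '-' ∨ c = '_') := by
          simpa [PySem.Chars.isdigit] using hk
        have hp : pvP c = false := by
          rw [Bool.eq_false_iff]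
          intro hpt
          revert hpt
          simp only [pvP, PySem.Chars.islower, PySem.Chars.isdigit, Bool.or_eq_true,
            Bool.and_eq_true, decide_eq_true_eq, beq_iff_eq]
          tauto
        simp only [List.filter_singleton, hp, cond_false]
        rw [if_neg (by tauto)]
        simp

theorem pvStep7_step (s : List Char) (c : Char) (hl : s.length ≤ 2)
    (hc : s.getLast? = some c) : aStep7 s = aStep7 (s ++ [c]) := by
  rw [aStep7.eq_def, if_pos hl]
  split
  · rename_i d hd
    rw [PySem.List.pyGet?_neg_one, hc] at hd
    cases hd
    rfl
  · rename_i hd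
    rw [PySem.List.pyGet?_neg_one, hc] at hd
    cases hd

theorem pvStep7_done (s : List Char) (hl : ¬ s.length ≤ 2) : aStep7 s = s := by
  rw [aStep7.eq_def, if_neg hl]

-- A's step-7 while loop is B's pad-to-length-3
theorem pvStep7_eq (s : List Char) (h : s ≠ []) :
    aStep7 s = if s.length < 3 then
        (match s.getLast? with
         | some c => s ++ List.replicate (3 - s.length) c
         | none => s)
      else s := by
  match s, h with
  | [a], _ =>
    rw [pvStep7_step [a] a (by simp) (by simp)]
    simp only [List.cons_append, List.nil_append]
    rw [pvStep7_step [a, a] a (by simp) (by simp)]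
    simp only [List.cons_append, List.nil_append]
    rw [pvStep7_done [a, a, a] (by simp)]
    simp [List.replicate]
  | [a, b], _ =>
    rw [pvStep7_step [a, b] b (by simp) (by simp)]
    simp only [List.cons_append, List.nil_append]
    rw [pvStep7_done [a, b, b] (by simp)]
    simp [List.replicate]
  | a :: b :: c :: t, _ =>
    rw [pvStep7_done _ (by simp)]
    rw [if_neg (by simp)]

theorem pvStep4a (x : List Char) :
    (if x.length ≠ 0 ∧ PySem.List.pyGet? x 0 = some '.'
     then PySem.List.slice x (some 1) none else x) = pvSL x := by
  cases x with
  | nil => simp [pvSL]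
  | cons a t =>
    simp [pvSL, PySem.List.slice_from, PySem.List.pyGet?_of_nonneg]

theorem pvStep4b (x : List Char) :
    (if x.length ≠ 0 ∧ PySem.List.pyGet? x (-1) = some '.'
     then PySem.List.slice x none (some (-1)) else x) =
    (if x ≠ [] ∧ x.getLast? = some '.' then x.dropLast else x) := by
  simp only [PySem.List.pyGet?_neg_one, PySem.List.slice_to_neg_one,
    ne_eq, List.length_eq_zero_iff]

theorem pvStep6 (x : List Char) :
    (if x.length > 15 then
       let a := PySem.List.slice x none (some 15)
       if PySem.List.pyGet? a (-1) = some '.' then PySem.List.slice a none (some (-1)) else a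
     else x) =
    (if x.length > 15 then
       let t := x.take 15
       if t.getLast? = some '.' then t.dropLast else t
     else x) := by
  simp only [PySem.List.pyGet?_neg_one, PySem.List.slice_to_neg_one,
    PySem.List.slice_to, Nat.ofNat_nonneg, Int.reduceToNat]

theorem pvMain (new_id : String) : solution new_id = solution_alt new_id := by
  unfold solution solution_alt
  dsimp only []
  have hfold : ∀ (L : List Char),
      L.foldl (fun acc c =>
        if PySem.Chars.islower c || PySem.Chars.isdigit c || (c == '-' || c == '_' || c == '.')
        then acc ++ [c] else acc) [] = L.filter pvP := by
    intro L
    simpa [pvP] using PySem.List.foldl_append_if pvP id L []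
  rw [hfold, pvStep3_eq_dedup, pvStep4a, pvStep4b, pvBloop, pvStep6]
  set y := (if (pvSL (pvDedup ((PySem.Chars.lower new_id.toList).filter pvP))) ≠ [] ∧
      (pvSL (pvDedup ((PySem.Chars.lower new_id.toList).filter pvP))).getLast? = some '.'
    then (pvSL (pvDedup ((PySem.Chars.lower new_id.toList).filter pvP))).dropLast
    else pvSL (pvDedup ((PySem.Chars.lower new_id.toList).filter pvP))) with hy
  set z := (if y = [] then ['a'] else y) with hz
  have hz_ne : z ≠ [] := by rw [hz]; split <;> simp_all
  set w := (if z.length > 15 then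
      (let t := z.take 15
       if t.getLast? = some '.' then t.dropLast else t)
    else z) with hw
  have hw_ne : w ≠ [] := by
    rw [hw]
    by_cases hlen : z.length > 15
    · rw [if_pos hlen]
      have h15 : (z.take 15).length = 15 := by simp; omega
      dsimp only []
      split
      · simp only [ne_eq, ← List.length_eq_zero_iff, List.length_dropLast, h15]
        omega
      · simp only [ne_eq, ← List.length_eq_zero_iff, h15]
        omega
    · rw [if_neg hlen]
      exact hz_ne
  rw [pvStep7_eq w hw_ne]

-- ===== VERDICT (by name: the statement is the Claim_ definition above) =====
theorem solution_spec : Claim_equal_solution := by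
  intro new_id _
  unfold Spec_solution
  exact pvMain new_id
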